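-- pv_equiv track=rewrite | github.com/yasidew/Codeharbor-2.0 | Drinks/views.py | ensure_blocks_have_bodies
-- ===== SOURCE A (Python) =====
-- def ensure_blocks_have_bodies(code_snippet):
--     """
--     Add placeholder 'pass' statements to ensure blocks have valid bodies.
--     """
--     lines = code_snippet.splitlines()
--     corrected_lines = []
--
--     for index, line in enumerate(lines):
--         stripped = line.strip()
--         if stripped.endswith(":") and (index + 1 >= len(lines) or not lines[index + 1].strip()):
--             corrected_lines.append(line)
--             corrected_lines.append("    pass  # Placeholder for empty block")
--         else:
--             corrected_lines.append(line)
--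
--     return "\n".join(corrected_lines)
-- ===== SOURCE B (Python) =====
-- def ensure_blocks_have_bodies(code_snippet):
--     """
--     Add placeholder 'pass' statements to ensure blocks have valid bodies.
--     Look-behind single pass: no index arithmetic, no look-ahead into lines.
--     """
--     out = []
--     prev_header = False
--     for line in code_snippet.splitlines():
--         stripped = line.strip()
--         if prev_header and not stripped:
--             out.append("    pass  # Placeholder for empty block")
--         out.append(line)
--         prev_header = stripped.endswith(":")
--     if prev_header:
--         out.append("    pass  # Placeholder for empty block")
--     return "\n".join(out)
-- ===== Notes on version B (the rewrite author's own statement) =====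
-- stated objective: alternative
-- what changed: Replaced the enumerate loop that looks ahead via lines[index+1] by a look-behind single pass carrying a boolean flag set from each stripped line, inserting the placeholder before the blank line and once after the loop for a trailing header.
import Mathlib
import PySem

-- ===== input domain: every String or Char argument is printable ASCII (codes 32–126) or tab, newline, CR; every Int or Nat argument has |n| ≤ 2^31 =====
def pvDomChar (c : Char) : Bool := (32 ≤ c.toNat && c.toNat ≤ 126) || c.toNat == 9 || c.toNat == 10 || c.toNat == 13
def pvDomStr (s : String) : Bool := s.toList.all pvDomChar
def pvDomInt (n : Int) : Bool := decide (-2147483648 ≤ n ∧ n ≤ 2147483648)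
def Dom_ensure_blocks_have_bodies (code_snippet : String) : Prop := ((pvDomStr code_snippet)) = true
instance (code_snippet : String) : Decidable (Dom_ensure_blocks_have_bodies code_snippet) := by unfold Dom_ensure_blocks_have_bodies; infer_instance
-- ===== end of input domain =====

-- B replaces A's enumerate loop with look-ahead indexing lines[index+1] by a
-- look-behind single pass carrying a "previous line was a header" flag (alternative decomposition, same cost).

def pvPass : String := "    pass  # Placeholder for empty block"

-- ===== PORT A =====
-- loop body of A: append the line, plus the placeholder when the stripped line
-- ends with ":" and the next line is missing or blank (look-ahead via lines[index+1])
def pvStepA (lines : List String) (acc : List String) (p : Int × String) : List String :=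
  let stripped := PySem.Str.strip p.2
  if PySem.Str.endswith stripped ":" &&
      (decide ((lines.length : Int) ≤ p.1 + 1) ||
       (PySem.Str.strip ((PySem.List.pyGet? lines (p.1 + 1)).getD "") == ""))
  then acc ++ [p.2, pvPass]
  else acc ++ [p.2]

def ensure_blocks_have_bodies (code_snippet : String) : String :=
  PySem.Str.join "\n"
    ((PySem.List.enumerate (PySem.Str.splitlines code_snippet) 0).foldl
      (pvStepA (PySem.Str.splitlines code_snippet)) [])

-- ===== PORT B =====
-- loop body of B: if the previous line was a header and this line is blank,
-- emit the placeholder first; state is (output so far, previous line was header)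
def pvStepB (st : List String × Bool) (line : String) : List String × Bool :=
  let stripped := PySem.Str.strip line
  let out := if st.2 && (stripped == "") then st.1 ++ [pvPass, line] else st.1 ++ [line]
  (out, PySem.Str.endswith stripped ":")

-- after the loop: one final placeholder if the last line was a header
def pvFin (st : List String × Bool) : List String :=
  if st.2 then st.1 ++ [pvPass] else st.1

def ensure_blocks_have_bodies_alt (code_snippet : String) : String :=
  PySem.Str.join "\n" (pvFin ((PySem.Str.splitlines code_snippet).foldl pvStepB ([], false)))

-- ===== PRECONDITION & SPEC =====
def Spec_ensure_blocks_have_bodies (code_snippet : String) (out : String) : Prop := out = ensure_blocks_have_bodies_alt code_snippet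
instance (code_snippet : String) (out : String) : Decidable (Spec_ensure_blocks_have_bodies code_snippet out) := by unfold Spec_ensure_blocks_have_bodies; infer_instance

-- ===== CLAIM (what is proved, stated in full; the proofs are below) =====
def Claim_equal_ensure_blocks_have_bodies : Prop := ∀ (code_snippet : String), Dom_ensure_blocks_have_bodies code_snippet → Spec_ensure_blocks_have_bodies code_snippet (ensure_blocks_have_bodies code_snippet)

-- ===== LEMMAS AND PROOFS =====

def pvBlank (s : String) : Bool := PySem.Str.strip s == ""
def pvHdr (s : String) : Bool := PySem.Str.endswith (PySem.Str.strip s) ":"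

/-- "the line after the current one is missing or blank", seen from the tail -/
def pvNext : List String → Bool
  | [] => true
  | y :: _ => pvBlank y

/-- common reference recursion both folds are reduced to -/
def pvSpec (acc : List String) : List String → List String
  | [] => acc
  | x :: rs => pvSpec (acc ++ (if pvHdr x && pvNext rs then [x, pvPass] else [x])) rs

theorem pvA_step (L : List String) (rs : List String) (i : ℕ) (h : L.drop (i + 1) = rs)
    (hi : i < L.length) (acc : List String) (x : String) :
    pvStepA L acc ((i : Int), x) = acc ++ (if pvHdr x && pvNext rs then [x, pvPass] else [x]) := by
  unfold pvStepA
  cases rs with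
  | nil =>
    have hlen : L.length = i + 1 := by
      have hle : L.length ≤ i + 1 := by
        by_contra hgt
        have := congrArg List.length h
        simp [List.length_drop] at this
        omega
      omega
    have hT : decide ((L.length : Int) ≤ (i : Int) + 1) = true := by simp [hlen]
    simp only [pvHdr, pvNext, hT, Bool.true_or, Bool.and_true]
    split <;> rename_i hh <;> simp at hh ⊢
  | cons y t =>
    have hget : L[i + 1]? = some y := by
      have := congrArg List.head? h
      rwa [List.head?_drop] at this
    have hlt : i + 1 < L.length := (List.getElem?_eq_some_iff.mp hget).1
    rw [show (i : Int) + 1 = ((i + 1 : ℕ) : Int) by push_cast; ring]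
    have hF : decide ((L.length : Int) ≤ ((i + 1 : ℕ) : Int)) = false := by
      simp; exact_mod_cast hlt
    simp only [PySem.List.pyGet?_natCast, hget, Option.getD_some, hF, Bool.false_or,
      pvHdr, pvNext, pvBlank]
    split <;> rename_i hh <;> simp at hh ⊢

theorem pvA_eq (L : List String) : ∀ (rest : List String) (i : ℕ), L.drop i = rest →
    ∀ acc, (PySem.List.enumerate rest (i : Int)).foldl (pvStepA L) acc = pvSpec acc rest := by
  intro rest
  induction rest with
  | nil => intro i _ acc; simp [PySem.List.enumerate, pvSpec]
  | cons x rs ih =>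
    intro i h acc
    have hdrop : L.drop (i + 1) = rs := by
      have := congrArg List.tail h
      simpa using this
    have hi : i < L.length := by
      by_contra hle
      simp [List.drop_eq_nil_of_le (le_of_not_gt hle)] at h
    rw [PySem.List.enumerate_cons, List.foldl_cons,
      pvA_step L rs i hdrop hi acc x,
      show (i : Int) + 1 = ((i + 1 : ℕ) : Int) by push_cast; ring,
      ih (i + 1) hdrop]
    rfl

theorem pvB_step (acc : List String) (prev : Bool) (x : String) (rs : List String) :
    pvStepB (acc, prev) x =
      ((acc ++ (if prev && pvNext (x :: rs) then [pvPass] else [])) ++ [x], pvHdr x) := by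
  unfold pvStepB pvHdr pvNext pvBlank
  cases prev <;> cases hb : (PySem.Str.strip x == "") <;> simp [hb]

theorem pvB_eq : ∀ (rest acc : List String) (prev : Bool),
    pvFin (rest.foldl pvStepB (acc, prev)) =
    pvSpec (acc ++ (if prev && pvNext rest then [pvPass] else [])) rest := by
  intro rest
  induction rest with
  | nil => intro acc prev; cases prev <;> simp [pvSpec, pvNext, pvFin]
  | cons x rs ih =>
    intro acc prev
    rw [List.foldl_cons, pvB_step acc prev x rs, ih]
    conv_rhs => rw [pvSpec]
    congr 1
    cases hc : (pvHdr x && pvNext rs) <;> simp [List.append_assoc]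

-- ===== VERDICT (by name: the statement is the Claim_ definition above) =====
theorem ensure_blocks_have_bodies_spec : Claim_equal_ensure_blocks_have_bodies := by
  intro code _
  show ensure_blocks_have_bodies code = ensure_blocks_have_bodies_alt code
  unfold ensure_blocks_have_bodies ensure_blocks_have_bodies_alt
  rw [show ((0 : Int)) = ((0 : ℕ) : Int) by norm_num,
    pvA_eq (PySem.Str.splitlines code) (PySem.Str.splitlines code) 0 rfl [],
    pvB_eq (PySem.Str.splitlines code) [] false]
  simp
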